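-- pv_equiv track=rewrite | github.com/TimkaSR1/SpartaRemixGenerator | pattern_generator.py | _parse_vocal_pattern
-- ===== SOURCE A (Python) =====
-- from typing import List, Dict, Tuple, Optional
--
-- def _parse_vocal_pattern(
--
--     pattern: str,
--     max_len_16ths: int,
--     num_samples: int,
--     allowed_indices: Optional[List[int]] = None,
-- ) -> List[Tuple[int, int, int]]:
--     """
--     Parse vocal pattern into (position_16th, sample_idx, duration_16ths).
--     Supports '*' after a digit to make it an 8th note (2x 16th).
--     '_' = rest (1x 16th).
--     """
--     events = []
--     pos = 0
--     i = 0
--     while i < len(pattern) and pos < max_len_16ths: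
--         ch = pattern[i]
--         if ch == '_':
--             pos += 1
--             i += 1
--             continue
--         if ch.isdigit():
--             dur = 1
--             if i + 1 < len(pattern) and pattern[i + 1] == '*':
--                 dur = 2
--                 i += 1  # skip '*'
--             sample_idx = int(ch) - 1
--             if allowed_indices:
--                 if not allowed_indices:
--                     i += 1
--                     pos += dur
--                     continue
--                 wrapped = allowed_indices[sample_idx % len(allowed_indices)]
--             else:
--                 wrapped = sample_idx % num_samples if num_samples > 0 else 0
--             events.append((pos, wrapped, dur))
--             pos += dur
--             i += 1
--             continue
--         # Any other char acts as rest
--         pos += 1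
--         i += 1
--     return events
-- ===== SOURCE B (Python) =====
-- from typing import List, Tuple, Optional
--
--
-- def _parse_vocal_pattern(
--     pattern: str,
--     max_len_16ths: int,
--     num_samples: int,
--     allowed_indices: Optional[List[int]] = None,
-- ) -> List[Tuple[int, int, int]]:
--     # Phase 1: lex the pattern into tokens — a digit immediately followed by '*'
--     # is one two-char token, every other character is its own token.
--     tokens = []
--     chars = list(pattern)
--     i = 0
--     while i < len(chars):
--         ch = chars[i]
--         if ch.isdigit() and i + 1 < len(chars) and chars[i + 1] == '*':
--             tokens.append(ch + '*')
--             i += 2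
--         else:
--             tokens.append(ch)
--             i += 1
--     # Phase 2: interpret the token stream.
--     events = []
--     pos = 0
--     for tok in tokens:
--         if pos >= max_len_16ths:
--             break
--         ch = tok[0]
--         if ch.isdigit():
--             dur = 2 if len(tok) == 2 else 1
--             sample_idx = int(ch) - 1
--             if allowed_indices:
--                 wrapped = allowed_indices[sample_idx % len(allowed_indices)]
--             else:
--                 wrapped = sample_idx % num_samples if num_samples > 0 else 0
--             events.append((pos, wrapped, dur))
--             pos += dur
--         else:
--             pos += 1
--     return events
-- ===== Notes on version B (the rewrite author's own statement) =====
-- stated objective: idiomatic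
-- what changed: Replaced A's single index-juggling while-loop with a two-phase design: a lexer that turns the pattern into tokens (a digit plus optional '*' is one token, any other character its own token) followed by an interpreter pass over the token stream maintaining pos with an early break.
import Mathlib
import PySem

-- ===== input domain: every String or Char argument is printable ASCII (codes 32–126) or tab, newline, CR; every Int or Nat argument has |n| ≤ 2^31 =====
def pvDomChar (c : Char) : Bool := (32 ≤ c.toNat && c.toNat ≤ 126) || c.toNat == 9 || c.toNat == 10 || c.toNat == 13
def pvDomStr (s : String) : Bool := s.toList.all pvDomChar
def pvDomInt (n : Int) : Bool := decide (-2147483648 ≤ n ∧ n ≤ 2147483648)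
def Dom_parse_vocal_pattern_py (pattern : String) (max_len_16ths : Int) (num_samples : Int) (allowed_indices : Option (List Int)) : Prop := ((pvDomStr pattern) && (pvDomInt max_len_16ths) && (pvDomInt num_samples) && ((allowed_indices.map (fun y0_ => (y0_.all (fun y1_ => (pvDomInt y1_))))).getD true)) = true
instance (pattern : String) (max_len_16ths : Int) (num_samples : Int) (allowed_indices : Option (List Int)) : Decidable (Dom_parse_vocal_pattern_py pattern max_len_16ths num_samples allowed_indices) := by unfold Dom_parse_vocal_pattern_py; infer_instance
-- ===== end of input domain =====

-- B re-implements A as a two-phase lexer (digit+'*' tokens) plus interpreter, replacing A's single index-juggling scan; objective: idiomatic decomposition, same cost.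


-- ===== PORT A =====
-- wrapped-index computation for a digit note: allowed_indices truthy → wrap into it, else modulo num_samples.
-- allowed_indices[sample_idx % len] is always in range (Python % of a positive length), so the .getD 0 default is never taken.
def pvA_wrapped (sample_idx : Int) (num_samples : Int) (allowed_indices : Option (List Int)) : Int :=
  match allowed_indices with
  | some (x :: xs) =>
      (PySem.List.pyGet? (x :: xs) (PySem.Int.mod sample_idx ((x :: xs).length : Int))).getD 0
  | _ => if num_samples > 0 then PySem.Int.mod sample_idx num_samples else 0

-- A's while loop over (pattern index, pos); the string is traversed as its char list,
-- pattern[i+1] == '*' becomes rest.head? = some '*', the i += 1 skip becomes rest.tail.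
def pvA_loop (cs : List Char) (max_len_16ths num_samples : Int) (allowed_indices : Option (List Int)) (pos : Int) : List (Int × Int × Int) :=
  match cs with
  | [] => []
  | ch :: rest =>
      if pos < max_len_16ths then
        if ch = '_' then pvA_loop rest max_len_16ths num_samples allowed_indices (pos + 1)
        else if ch.isDigit then
          let sample_idx : Int := (ch.toNat : Int) - 48 - 1
          let wrapped := pvA_wrapped sample_idx num_samples allowed_indices
          if rest.head? = some '*' then
            (pos, wrapped, 2) :: pvA_loop rest.tail max_len_16ths num_samples allowed_indices (pos + 2)
          else
            (pos, wrapped, 1) :: pvA_loop rest max_len_16ths num_samples allowed_indices (pos + 1)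
        else pvA_loop rest max_len_16ths num_samples allowed_indices (pos + 1)
      else []
termination_by cs.length
decreasing_by all_goals simp

def parse_vocal_pattern_py (pattern : String) (max_len_16ths : Int) (num_samples : Int) (allowed_indices : Option (List Int)) : List (Int × Int × Int) :=
  pvA_loop pattern.toList max_len_16ths num_samples allowed_indices 0

-- ===== PORT B =====
-- Phase 1 of Source B: lex into tokens — a digit immediately followed by '*' is one two-char token, anything else one char.
def pvB_lex (cs : List Char) : List String :=
  match cs with
  | [] => []
  | ch :: rest =>
      if ch.isDigit ∧ rest.head? = some '*' then String.ofList [ch, '*'] :: pvB_lex rest.tail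
      else String.ofList [ch] :: pvB_lex rest
termination_by cs.length
decreasing_by all_goals simp

-- Phase 2 of Source B: interpret the token stream, breaking once pos reaches max_len_16ths.
-- A lexer token is never empty, so tok[0] always exists; the [] branch is unreachable.
def pvB_run (tokens : List String) (max_len_16ths num_samples : Int) (allowed_indices : Option (List Int)) (pos : Int) : List (Int × Int × Int) :=
  match tokens with
  | [] => []
  | tok :: rest =>
      if pos < max_len_16ths then
        match tok.toList with
        | ch :: _ =>
            if ch.isDigit then
              let dur : Int := if tok.toList.length = 2 then 2 else 1
              let sample_idx : Int := (ch.toNat : Int) - 48 - 1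
              let wrapped : Int :=
                match allowed_indices with
                | some (x :: xs) =>
                    (PySem.List.pyGet? (x :: xs) (PySem.Int.mod sample_idx ((x :: xs).length : Int))).getD 0
                | _ => if num_samples > 0 then PySem.Int.mod sample_idx num_samples else 0
              (pos, wrapped, dur) :: pvB_run rest max_len_16ths num_samples allowed_indices (pos + dur)
            else pvB_run rest max_len_16ths num_samples allowed_indices (pos + 1)
        | [] => pvB_run rest max_len_16ths num_samples allowed_indices (pos + 1)
      else []

def parse_vocal_pattern_py_alt (pattern : String) (max_len_16ths : Int) (num_samples : Int) (allowed_indices : Option (List Int)) : List (Int × Int × Int) :=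
  pvB_run (pvB_lex pattern.toList) max_len_16ths num_samples allowed_indices 0

-- ===== PRECONDITION & SPEC =====
def Spec_parse_vocal_pattern_py (pattern : String) (max_len_16ths : Int) (num_samples : Int) (allowed_indices : Option (List Int)) (out : List (Int × Int × Int)) : Prop := out = parse_vocal_pattern_py_alt pattern max_len_16ths num_samples allowed_indices
instance (pattern : String) (max_len_16ths : Int) (num_samples : Int) (allowed_indices : Option (List Int)) (out : List (Int × Int × Int)) : Decidable (Spec_parse_vocal_pattern_py pattern max_len_16ths num_samples allowed_indices out) := by unfold Spec_parse_vocal_pattern_py; infer_instance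

-- ===== CLAIM (what is proved, stated in full; the proofs are below) =====
def Claim_equal_parse_vocal_pattern_py : Prop := ∀ (pattern : String) (max_len_16ths : Int) (num_samples : Int) (allowed_indices : Option (List Int)), Dom_parse_vocal_pattern_py pattern max_len_16ths num_samples allowed_indices → Spec_parse_vocal_pattern_py pattern max_len_16ths num_samples allowed_indices (parse_vocal_pattern_py pattern max_len_16ths num_samples allowed_indices)

-- ===== LEMMAS AND PROOFS =====

-- Running B's interpreter on B's token stream retraces A's scan step for step
-- (strong induction on the length of the remaining pattern, since the lexer consumes up to two chars).
theorem pv_key (m n : Int) (ai : Option (List Int)) :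
    ∀ (k : Nat) (cs : List Char), cs.length ≤ k → ∀ pos,
      pvB_run (pvB_lex cs) m n ai pos = pvA_loop cs m n ai pos := by
  intro k
  induction k with
  | zero =>
      intro cs h pos
      have : cs = [] := List.eq_nil_of_length_eq_zero (Nat.le_zero.mp h)
      subst this; simp [pvB_lex, pvB_run, pvA_loop]
  | succ k ih =>
      intro cs h pos
      cases cs with
      | nil => simp [pvB_lex, pvB_run, pvA_loop]
      | cons ch rest =>
          by_cases hstar : ch.isDigit ∧ rest.head? = some '*'
          · rw [pvB_lex]; rw [if_pos hstar]
            rw [pvB_run, pvA_loop]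
            by_cases hp : pos < m
            · have hne : ch ≠ '_' := by
                intro h'; subst h'; exact absurd hstar.1 (by decide)
              simp [hp, hne, hstar.1, hstar.2, pvA_wrapped,
                    ih rest.tail (by simp at h ⊢; omega)]
            · simp [hp]
          · rw [pvB_lex]; rw [if_neg hstar]
            rw [pvB_run, pvA_loop]
            by_cases hp : pos < m
            · by_cases hd : ch.isDigit
              · have hne : ch ≠ '_' := by
                  intro h'; subst h'; exact absurd hd (by decide)
                have hns : rest.head? ≠ some '*' := fun h' => hstar ⟨hd, h'⟩
                simp [hp, hne, hd, hns, pvA_wrapped,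
                      ih rest (by simp at h; omega)]
              · by_cases hu : ch = '_' <;>
                  simp [hp, hu, hd, ih rest (by simp at h; omega)]
            · simp [hp]

-- ===== VERDICT (by name: the statement is the Claim_ definition above) =====
theorem parse_vocal_pattern_py_spec : Claim_equal_parse_vocal_pattern_py := by
  intro pattern m n ai _
  unfold Spec_parse_vocal_pattern_py parse_vocal_pattern_py parse_vocal_pattern_py_alt
  exact (pv_key m n ai pattern.toList.length pattern.toList le_rfl 0).symm
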